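-- pv_equiv track=rewrite | github.com/khushsi/ConceptExtractor | entity/concept_extractor.py | isInChunk
-- ===== SOURCE A (Python) =====
-- def KnuthMorrisPratt(text, pattern):
--
--     '''Yields all starting positions of copies of the pattern in the text.
-- Calling conventions are similar to string.find, but its arguments can be
-- lists or iterators, not just strings, it returns all matches, not just
-- the first one, and it does not need the whole text in memory at once.
-- Whenever it yields, it will have read the text exactly up to and including
-- the match that caused the yield.'''
--
--     # allow indexing into pattern and protect against change during yield
--     pattern = list(pattern)
--
--     # build table of shift amounts
--     shifts = [1] * (len(pattern) + 1)
--     shift = 1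
--     for pos in range(len(pattern)):
--         while shift <= pos and pattern[pos] != pattern[pos-shift]:
--             shift += shifts[pos-shift]
--         shifts[pos+1] = shift
--
--     # do the actual search
--     startPos = 0
--     matchLen = 0
--     for c in text:
--         while matchLen == len(pattern) or \
--               matchLen >= 0 and pattern[matchLen] != c:
--             startPos += shifts[matchLen]
--             matchLen -= shifts[matchLen]
--         matchLen += 1
--         if matchLen == len(pattern):
--             yield startPos
--
-- def isInChunk(word,chunklist):
--     wordlist = word.split(" ")
--     if word in chunklist:
--         return True
--     if len(wordlist) > 1:
--         for chunk in chunklist: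
--             listchunk = chunk.split(" ")
--             for s in KnuthMorrisPratt(listchunk,wordlist):
--                 return True
--     return False
-- ===== SOURCE B (Python) =====
-- def isInChunk(word, chunklist):
--     wordlist = word.split(" ")
--     if word in chunklist:
--         return True
--     if len(wordlist) > 1:
--         m = len(wordlist)
--         for chunk in chunklist:
--             tokens = chunk.split(" ")
--             for i in range(len(tokens) - m + 1):
--                 if tokens[i:i + m] == wordlist:
--                     return True
--     return False
-- ===== Notes on version B (the rewrite author's own statement) =====
-- stated objective: simpler
-- what changed: B drops the KnuthMorrisPratt generator (failure-table construction plus resumable streaming search) and tests the same token-subsequence predicate with a plain sliding-window slice comparison per chunk, keeping the membership fast path and the multi-token guard.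
import Mathlib
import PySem

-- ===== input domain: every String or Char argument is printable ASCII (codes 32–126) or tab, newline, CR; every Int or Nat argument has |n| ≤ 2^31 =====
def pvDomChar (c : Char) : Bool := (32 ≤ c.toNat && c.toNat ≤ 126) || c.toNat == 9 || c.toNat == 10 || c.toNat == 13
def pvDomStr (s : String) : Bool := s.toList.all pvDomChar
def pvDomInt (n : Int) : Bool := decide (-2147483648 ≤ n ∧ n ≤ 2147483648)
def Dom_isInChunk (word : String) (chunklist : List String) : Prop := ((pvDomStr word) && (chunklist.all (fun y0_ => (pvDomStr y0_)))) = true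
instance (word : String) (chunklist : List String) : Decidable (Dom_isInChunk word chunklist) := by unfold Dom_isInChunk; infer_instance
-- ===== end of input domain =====

-- B replaces the generator-based Knuth-Morris-Pratt token search with a plain sliding-window
-- comparison over the token lists (simpler; same predicate, proved equal below).

-- ===== PORT A =====
-- Inner `while` of the shift-table construction.  Python's `while` is ported with fuel;
-- fuel pos+2 always suffices because `shift` grows by at least 1 per pass and the loop
-- stops once shift > pos (proved below).  pattern[pos] / pattern[pos-shift] are always
-- in range here, so comparing the two `pyGet?` options is exactly Python's `!=`.
def kmpShiftLoop (pattern : List (List Char)) (shifts : List Int) (pos : Int) : Int → Nat → Int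
  | shift, 0 => shift
  | shift, fuel+1 =>
    if shift ≤ pos ∧ PySem.List.pyGet? pattern pos ≠ PySem.List.pyGet? pattern (pos - shift) then
      -- shifts[pos-shift]: the index is always in range, so the default 1 is never used
      kmpShiftLoop pattern shifts pos (shift + PySem.List.pyGetD shifts (pos - shift) 1) fuel
    else shift

-- `shifts = [1]*(len(pattern)+1)` then the `for pos in range(len(pattern))` loop;
-- `shifts[pos+1] = shift` is List.set.
def kmpTable (pattern : List (List Char)) : List Int :=
  ((List.range pattern.length).foldl
    (fun (st : List Int × Int) (pos : Nat) =>
      let shift := kmpShiftLoop pattern st.1 (pos : Int) st.2 (pos + 2)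
      (st.1.set (pos + 1) shift, shift))
    (List.replicate (pattern.length + 1) 1, 1)).1

-- Inner `while` of the search; fuel ml+2 always suffices (matchLen drops by ≥ 1 per pass
-- and the loop stops once matchLen < 0).  shifts[matchLen] is always in range.
def kmpSearchLoop (pattern : List (List Char)) (shifts : List Int) (c : List Char) : Int → Int → Nat → Int × Int
  | sp, ml, 0 => (sp, ml)
  | sp, ml, fuel+1 =>
    if ml = (pattern.length : Int) ∨ (0 ≤ ml ∧ PySem.List.pyGet? pattern ml ≠ some c) then
      kmpSearchLoop pattern shifts c (sp + PySem.List.pyGetD shifts ml 1)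
        (ml - PySem.List.pyGetD shifts ml 1) fuel
    else (sp, ml)

-- `for s in KnuthMorrisPratt(listchunk, wordlist): return True`: the generator is run
-- only up to its first yield, i.e. this Bool; the flag freezes the state after a yield.
def kmpFirstYield (text pattern : List (List Char)) : Bool :=
  let shifts := kmpTable pattern
  (text.foldl (fun (st : Int × Int × Bool) c =>
      if st.2.2 then st else
        let r := kmpSearchLoop pattern shifts c st.1 st.2.1 (st.2.1.toNat + 2)
        (r.1, r.2 + 1, decide (r.2 + 1 = (pattern.length : Int))))
    ((0 : Int), (0 : Int), false)).2.2

def isInChunk (word : String) (chunklist : List String) : Bool :=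
  let wordlist := PySem.Chars.splitOn word.toList " ".toList
  if chunklist.contains word then true
  else if wordlist.length > 1 then
    chunklist.any (fun chunk => kmpFirstYield (PySem.Chars.splitOn chunk.toList " ".toList) wordlist)
  else false

-- ===== PORT B =====
def isInChunk_alt (word : String) (chunklist : List String) : Bool :=
  let wordlist := PySem.Chars.splitOn word.toList " ".toList
  if chunklist.contains word then true
  else if wordlist.length > 1 then
    let m := wordlist.length
    chunklist.any (fun chunk =>
      let tokens := PySem.Chars.splitOn chunk.toList " ".toList
      (PySem.List.pyRange 0 ((tokens.length : Int) - (m : Int) + 1) 1).any (fun i =>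
        PySem.List.slice tokens (some i) (some (i + (m : Int))) == wordlist))
  else false

-- ===== PRECONDITION & SPEC =====
def Spec_isInChunk (word : String) (chunklist : List String) (out : Bool) : Prop := out = isInChunk_alt word chunklist
instance (word : String) (chunklist : List String) (out : Bool) : Decidable (Spec_isInChunk word chunklist out) := by unfold Spec_isInChunk; infer_instance

-- ===== CLAIM (what is proved, stated in full; the proofs are below) =====
def Claim_equal_isInChunk : Prop := ∀ (word : String) (chunklist : List String), Dom_isInChunk word chunklist → Spec_isInChunk word chunklist (isInChunk word chunklist)

-- ===== LEMMAS AND PROOFS =====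

-- `Border p m b`: the first b tokens of p are also the last b tokens of p's first m tokens
-- (index form, so all the table reasoning is arithmetic on getElem?).
def Border (p : List (List Char)) (m b : Nat) : Prop :=
  b ≤ m ∧ ∀ i : Nat, i < b → p[i]? = p[m - b + i]?

-- `OccAt t p j`: p occurs in t starting at j (pointwise; forces j + |p| ≤ |t|).
def OccAt (t p : List (List Char)) (j : Nat) : Prop :=
  ∀ i : Nat, i < p.length → t[j + i]? = p[i]?

-- the KMP table invariant: v = shifts[m] is the least period ≥ 1 of p's first m tokens.
def GoodVal (p : List (List Char)) (m : Nat) (v : Int) : Prop :=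
  1 ≤ v ∧ v ≤ (max m 1 : Nat) ∧ Border p m (m - v.toNat) ∧
  ∀ s : Nat, 1 ≤ s → (s : Int) < v → ¬ Border p m (m - s)

lemma border_zero (p : List (List Char)) (m : Nat) : Border p m 0 :=
  ⟨Nat.zero_le _, fun i hi => absurd hi (Nat.not_lt_zero i)⟩

lemma border_trans {p : List (List Char)} {m b c : Nat}
    (h1 : Border p m b) (h2 : Border p b c) : Border p m c := by
  obtain ⟨hb, H1⟩ := h1; obtain ⟨hc, H2⟩ := h2
  refine ⟨hc.trans hb, fun i hi => ?_⟩
  have e1 := H2 i hi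
  have e2 := H1 (b - c + i) (by omega)
  rw [e1, e2]; congr 1; omega

lemma border_sub {p : List (List Char)} {m b1 b2 : Nat}
    (h1 : Border p m b1) (h2 : Border p m b2) (hle : b1 ≤ b2) : Border p b2 b1 := by
  obtain ⟨hb1, H1⟩ := h1; obtain ⟨hb2, H2⟩ := h2
  refine ⟨hle, fun i hi => ?_⟩
  have e1 := H1 i hi
  have e2 := H2 (b2 - b1 + i) (by omega)
  rw [e1, e2]; congr 1; omega

lemma border_restrict {p : List (List Char)} {m b : Nat}
    (h : Border p (m + 1) (b + 1)) : Border p m b := by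
  obtain ⟨hb, H⟩ := h
  refine ⟨by omega, fun i hi => ?_⟩
  have := H i (by omega)
  rw [this]; congr 1; omega

lemma border_extend {p : List (List Char)} {m b : Nat}
    (h : Border p m b) (hc : p[m]? = p[b]?) : Border p (m + 1) (b + 1) := by
  obtain ⟨hb, H⟩ := h
  refine ⟨by omega, fun i hi => ?_⟩
  rcases Nat.lt_or_ge i b with hib | hib
  · have := H i hib
    rw [this]; congr 1; omega
  · have : i = b := by omega
    subst this
    rw [hc.symm]; congr 1; omega

lemma pyGetD_eq_getD (S : List Int) (i : Int) (h0 : 0 ≤ i) (h1 : i < S.length) :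
    PySem.List.pyGetD S i 1 = S.getD i.toNat 1 := by
  rw [PySem.List.pyGetD_eq_getElem S 1 h0 h1, List.getD_eq_getElem?_getD,
    List.getElem?_eq_getElem (by omega)]
  rfl

lemma getD_set_self (l : List Int) (i : Nat) (v : Int) (h : i < l.length) :
    (l.set i v).getD i 1 = v := by
  rw [List.getD_eq_getElem?_getD, List.getElem?_set_self h]; rfl

lemma getD_set_ne (l : List Int) (i m : Nat) (v : Int) (h : m ≠ i) :
    (l.set i v).getD m 1 = l.getD m 1 := by
  rw [List.getD_eq_getElem?_getD, List.getElem?_set_ne (Ne.symm h), ← List.getD_eq_getElem?_getD]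

lemma shiftLoop_spec (p : List (List Char)) (S : List Int) (pos : Nat)
    (hpos : pos < p.length) (hS : S.length = p.length + 1)
    (hG : ∀ j : Nat, j ≤ pos → GoodVal p j (S.getD j 1)) :
    ∀ (fuel : Nat) (shift : Int),
      1 ≤ shift → shift ≤ (pos : Int) + 1 →
      (shift ≤ (pos : Int) → Border p pos (pos - shift.toNat)) →
      (∀ s : Nat, 1 ≤ s → (s : Int) < shift → ¬ Border p (pos + 1) (pos + 1 - s)) →
      ((pos : Int) + 1 - shift < (fuel : Int)) →
      GoodVal p (pos + 1) (kmpShiftLoop p S (pos : Int) shift fuel) := by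
  intro fuel
  induction fuel with
  | zero =>
    intro shift h1 h2 h3 h4 hfuel
    exfalso
    have : ((0:Nat):Int) = 0 := rfl
    omega
  | succ fuel ih =>
    intro shift h1 h2 h3 h4 hfuel
    rw [kmpShiftLoop]
    by_cases hcond : (shift ≤ (pos : Int) ∧
        PySem.List.pyGet? p (pos : Int) ≠ PySem.List.pyGet? p ((pos : Int) - shift))
    · rw [if_pos hcond]
      obtain ⟨hsp, hmis⟩ := hcond
      set shiftN := shift.toNat with hsN
      have hsNs : (shiftN : Int) = shift := by omega
      have hq0 : (0:Int) ≤ (pos : Int) - shift := by omega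
      set qN := ((pos : Int) - shift).toNat with hqN
      have hqeq : qN = pos - shiftN := by omega
      have hqle : qN ≤ pos := by omega
      have hv : PySem.List.pyGetD S ((pos : Int) - shift) 1 = S.getD qN 1 := by
        apply pyGetD_eq_getD S _ hq0; omega
      obtain ⟨g1, g2, gb, gmin⟩ := hG qN hqle
      set v := S.getD qN 1 with hvdef
      set vN := v.toNat with hvN
      have hvNv : (vN : Int) = v := by omega
      have hg2' : vN ≤ max qN 1 := by omega
      rw [hv]
      have hsh' : 1 ≤ shift + v := by omega
      have hle' : shift + v ≤ (pos : Int) + 1 := by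
        rcases Nat.eq_zero_or_pos qN with h | h
        · rw [h] at hg2'; simp at hg2'; omega
        · have : max qN 1 = qN := by omega
          rw [this] at hg2'; omega
      apply ih (shift + v) hsh' hle' ?_ ?_ (by omega)
      · -- shift + v is still a period of p[0:pos]
        intro hle
        have hB1 : Border p pos (pos - shiftN) := h3 hsp
        have hgb : Border p qN (qN - vN) := gb
        have htn : (shift + v).toNat = shiftN + vN := by omega
        rw [htn]
        have : pos - (shiftN + vN) = qN - vN := by omega
        rw [this]
        exact border_trans hB1 (by rw [← hqeq]; exact hgb)
      · -- minimality is preserved for all s < shift + v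
        intro s hs1 hsv hB
        rcases lt_trichotomy ((s : Nat) : Int) shift with hlt | heq | hgt
        · exact h4 s hs1 hlt hB
        · -- s = shift : the mismatched character kills the border
          have hsEq : s = shiftN := by omega
          obtain ⟨hble, hb⟩ := hB
          have hi : pos - shiftN < pos + 1 - s := by omega
          have := hb (pos - shiftN) (by omega)
          have hidx : pos + 1 - (pos + 1 - s) + (pos - shiftN) = pos := by omega
          rw [hidx] at this
          apply hmis
          rw [PySem.List.pyGet?_of_nonneg p (by positivity),
            PySem.List.pyGet?_of_nonneg p hq0]
          have h5 : ((pos:Int)).toNat = pos := by omega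
          rw [h5, ← hqN, hqeq, this]
        · -- shift < s < shift + v : contradicts minimality at pos - shift
          have hsk : s ≤ pos := by omega
          have hB' : Border p pos (pos - s) := by
            have : pos + 1 - s = (pos - s) + 1 := by omega
            rw [this] at hB
            exact border_restrict hB
          have hB1 : Border p pos (pos - shiftN) := h3 hsp
          have hsub : Border p (pos - shiftN) (pos - s) :=
            border_sub hB' hB1 (by omega)
          have hmlN1 : 1 ≤ qN := by
            by_contra h
            have : qN = 0 := by omega
            rw [this] at hg2'; simp at hg2'; omega
          apply gmin (s - shiftN) (by omega) (by omega)
          rw [hqeq]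
          have : pos - shiftN - (s - shiftN) = pos - s := by omega
          rw [this]
          exact hsub
    · rw [if_neg hcond]
      push Not at hcond
      refine ⟨h1, ?_, ?_, fun s hs1 hss => h4 s hs1 hss⟩
      · have : max (pos + 1) 1 = pos + 1 := by omega
        rw [this]; omega
      · rcases Int.lt_or_le (pos : Int) shift with hgt | hle
        · have : pos + 1 - shift.toNat = 0 := by omega
          rw [this]
          exact border_zero p (pos + 1)
        · have hchar := hcond hle
          have hB := h3 hle
          have hch : p[pos]? = p[pos - shift.toNat]? := by
            rw [PySem.List.pyGet?_of_nonneg p (by positivity),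
              PySem.List.pyGet?_of_nonneg p (by omega)] at hchar
            have h5 : ((pos:Int)).toNat = pos := by omega
            have h6 : (((pos:Int)) - shift).toNat = pos - shift.toNat := by omega
            rwa [h5, h6] at hchar
          have := border_extend hB hch
          have hidx : pos + 1 - shift.toNat = (pos - shift.toNat) + 1 := by omega
          rw [hidx]
          exact this

lemma tableAux (p : List (List Char)) :
    ∀ k : Nat, k ≤ p.length →
      (((List.range k).foldl
        (fun (st : List Int × Int) (pos : Nat) =>
          let shift := kmpShiftLoop p st.1 (pos : Int) st.2 (pos + 2)
          (st.1.set (pos + 1) shift, shift))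
        (List.replicate (p.length + 1) 1, 1)).1.length = p.length + 1) ∧
      (((List.range k).foldl
        (fun (st : List Int × Int) (pos : Nat) =>
          let shift := kmpShiftLoop p st.1 (pos : Int) st.2 (pos + 2)
          (st.1.set (pos + 1) shift, shift))
        (List.replicate (p.length + 1) 1, 1)).2
        = ((List.range k).foldl
        (fun (st : List Int × Int) (pos : Nat) =>
          let shift := kmpShiftLoop p st.1 (pos : Int) st.2 (pos + 2)
          (st.1.set (pos + 1) shift, shift))
        (List.replicate (p.length + 1) 1, 1)).1.getD k 1) ∧
      (∀ m : Nat, m ≤ k →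
        GoodVal p m (((List.range k).foldl
        (fun (st : List Int × Int) (pos : Nat) =>
          let shift := kmpShiftLoop p st.1 (pos : Int) st.2 (pos + 2)
          (st.1.set (pos + 1) shift, shift))
        (List.replicate (p.length + 1) 1, 1)).1.getD m 1)) := by
  intro k
  induction k with
  | zero =>
    intro _
    refine ⟨by simp, by simp [List.getD_eq_getElem?_getD], ?_⟩
    intro m hm
    have hm0 : m = 0 := by omega
    subst hm0
    have : ((List.replicate (p.length + 1) (1:Int)).getD 0 1) = 1 := by
      simp [List.getD_eq_getElem?_getD]
    simp only [List.range_zero, List.foldl_nil, this]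
    refine ⟨le_rfl, by simp, ?_, ?_⟩
    · have : (0:Nat) - (1:Int).toNat = 0 := by omega
      rw [this]; exact border_zero p 0
    · intro s hs1 hss; omega
  | succ k ihk =>
    intro hk1
    obtain ⟨ih1, ih2, ih3⟩ := ihk (by omega)
    rw [List.range_succ, List.foldl_append, List.foldl_cons, List.foldl_nil]
    set st := ((List.range k).foldl
        (fun (st : List Int × Int) (pos : Nat) =>
          let shift := kmpShiftLoop p st.1 (pos : Int) st.2 (pos + 2)
          (st.1.set (pos + 1) shift, shift))
        (List.replicate (p.length + 1) 1, 1)) with hst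
    obtain ⟨g1, g2, gb, gmin⟩ := ih3 k le_rfl
    have hr : GoodVal p (k + 1) (kmpShiftLoop p st.1 (k : Int) st.2 (k + 2)) := by
      apply shiftLoop_spec p st.1 k (by omega) ih1 (fun j hj => ih3 j hj) (k + 2) st.2
      · rw [ih2]; exact g1
      · rw [ih2]
        have : max k 1 ≤ k + 1 := by omega
        omega
      · intro _
        rw [ih2]
        exact gb
      · intro s hs1 hss hB
        rw [ih2] at hss
        have hsk : s ≤ k := by
          rcases Nat.eq_zero_or_pos k with h | h
          · subst h
            have : max 0 1 = 1 := by omega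
            rw [this] at g2; omega
          · have : max k 1 = k := by omega
            rw [this] at g2; omega
        apply gmin s hs1 hss
        have : k + 1 - s = (k - s) + 1 := by omega
        rw [this] at hB
        exact border_restrict hB
      · rw [ih2]; omega
    set r := kmpShiftLoop p st.1 (k : Int) st.2 (k + 2) with hrdef
    have hlen : (st.1.set (k + 1) r).length = p.length + 1 := by
      rw [List.length_set]; exact ih1
    refine ⟨hlen, ?_, ?_⟩
    · show r = (st.1.set (k + 1) r).getD (k + 1) 1
      rw [getD_set_self st.1 (k + 1) r (by omega)]
    · intro m hm
      rcases Nat.lt_or_ge m (k + 1) with hmk | hmk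
      · show GoodVal p m ((st.1.set (k + 1) r).getD m 1)
        rw [getD_set_ne st.1 (k + 1) m r (by omega)]
        exact ih3 m (by omega)
      · have hmeq : m = k + 1 := by omega
        subst hmeq
        show GoodVal p (k + 1) ((st.1.set (k + 1) r).getD (k + 1) 1)
        rw [getD_set_self st.1 (k + 1) r (by omega)]
        exact hr

lemma kmpTable_spec (p : List (List Char)) :
    (kmpTable p).length = p.length + 1 ∧
    ∀ m : Nat, m ≤ p.length → GoodVal p m ((kmpTable p).getD m 1) := by
  obtain ⟨h1, _, h3⟩ := tableAux p p.length le_rfl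
  exact ⟨h1, h3⟩

lemma searchLoop_spec (p : List (List Char)) (S : List Int) (t : List (List Char)) (c : List Char)
    (hp : 1 ≤ p.length) (hS : S.length = p.length + 1)
    (hG : ∀ m : Nat, m ≤ p.length → GoodVal p m (S.getD m 1))
    (k : Nat) (hc : t[k]? = some c) :
    ∀ (fuel : Nat) (sp ml : Int),
      0 ≤ sp → -1 ≤ ml → ml < (p.length : Int) → sp + ml = (k : Int) →
      (∀ j : Nat, (j : Int) < ml → t[k - ml.toNat + j]? = p[j]?) →
      (∀ j : Nat, (j : Int) < sp → ¬ OccAt t p j) →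
      ml + 1 < (fuel : Int) →
      sp ≤ (kmpSearchLoop p S c sp ml fuel).1 ∧
      (kmpSearchLoop p S c sp ml fuel).1 + (kmpSearchLoop p S c sp ml fuel).2 = (k : Int) ∧
      -1 ≤ (kmpSearchLoop p S c sp ml fuel).2 ∧
      (kmpSearchLoop p S c sp ml fuel).2 < (p.length : Int) ∧
      (∀ j : Nat, (j : Int) < (kmpSearchLoop p S c sp ml fuel).2 →
        t[k - (kmpSearchLoop p S c sp ml fuel).2.toNat + j]? = p[j]?) ∧
      (0 ≤ (kmpSearchLoop p S c sp ml fuel).2 →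
        p[(kmpSearchLoop p S c sp ml fuel).2.toNat]? = some c) ∧
      (∀ j : Nat, (j : Int) < (kmpSearchLoop p S c sp ml fuel).1 → ¬ OccAt t p j) := by
  intro fuel
  induction fuel with
  | zero =>
    intro sp ml h0 h1 h2 h3 hseg hnocc hfuel
    exfalso
    have : ((0:Nat):Int) = 0 := rfl
    omega
  | succ fuel ih =>
    intro sp ml h0 h1 h2 h3 hseg hnocc hfuel
    rw [kmpSearchLoop]
    by_cases hcond : (ml = (p.length : Int) ∨ (0 ≤ ml ∧ PySem.List.pyGet? p ml ≠ some c))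
    · rw [if_pos hcond]
      have hml0 : 0 ≤ ml := by
        rcases hcond with h | h
        · omega
        · exact h.1
      have hmis : PySem.List.pyGet? p ml ≠ some c := by
        rcases hcond with h | h
        · omega
        · exact h.2
      set mlN := ml.toNat with hmlN
      have hmlk : (mlN : Int) = ml := by omega
      have hmlp : mlN < p.length := by omega
      have hv : PySem.List.pyGetD S ml 1 = S.getD mlN 1 := by
        apply pyGetD_eq_getD S ml hml0; omega
      set v := S.getD mlN 1 with hvdef
      obtain ⟨hv1, hv2, hvb, hvmin⟩ := hG mlN (by omega)
      set vN := v.toNat with hvN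
      have hvNv : (vN : Int) = v := by omega
      have hv2' : vN ≤ max mlN 1 := by omega
      have hv1' : 1 ≤ vN := by omega
      rw [hv]
      -- bounds for the recursive call
      have hml1' : -1 ≤ ml - v := by
        rcases Nat.eq_zero_or_pos mlN with h | h
        · simp [h] at hv2'; omega
        · have : max mlN 1 = mlN := by omega
          rw [this] at hv2'; omega
      have hcall := ih (sp + v) (ml - v) (by omega) hml1' (by omega) (by omega)
        ?_ ?_ (by omega)
      · obtain ⟨c1, c2, c3, c4, c5, c6, c7⟩ := hcall
        exact ⟨by omega, c2, c3, c4, c5, c6, c7⟩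
      · -- segment invariant after the shift
        intro j hj
        have hmv0 : (0:Int) < ml - v := by
          have : (0:Int) ≤ (j : Int) := by positivity
          omega
        have hmlN1 : 1 ≤ mlN := by
          by_contra h
          have : mlN = 0 := by omega
          rw [this] at hv2'; simp at hv2'; omega
        have hvml : vN ≤ mlN := by
          have : max mlN 1 = mlN := by omega
          omega
        have htoNat : (ml - v).toNat = mlN - vN := by omega
        have hj' : vN + j < mlN := by omega
        have e1 := hseg (vN + j) (by omega)
        obtain ⟨_, hb⟩ := hvb
        have e2 := hb j (by omega)
        have idx1 : mlN - (mlN - vN) + j = vN + j := by omega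
        rw [idx1] at e2
        have idx2 : k - (ml - v).toNat + j = k - mlN + (vN + j) := by
          rw [htoNat]; omega
        rw [idx2, e1, ← e2]
      · -- no occurrence below the new start position
        intro j hj hocc
        rcases Int.lt_or_le (j : Int) sp with hjs | hjs
        · exact hnocc j hjs hocc
        · set spN := sp.toNat with hspN
          have hsp : (spN : Int) = sp := by omega
          set s := j - spN with hsdef
          have hjeq : j = spN + s := by omega
          have hsv : (s : Int) < v := by omega
          have hkm : k - mlN = spN := by omega
          rcases Nat.eq_zero_or_pos s with hs0 | hs1
          · -- s = 0 : the mismatch at position k contradicts an occurrence at sp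
            have e := hocc mlN hmlp
            have : spN + mlN = k := by omega
            rw [hjeq, hs0] at e
            simp only [Nat.add_zero] at e
            rw [this, hc] at e
            apply hmis
            rw [PySem.List.pyGet?_of_nonneg p hml0, ← hmlN, ← e]
          · -- 1 ≤ s < v : would be a border the table minimality forbids
            have hmlN1 : 1 ≤ mlN := by
              by_contra h
              have : mlN = 0 := by omega
              rw [this] at hv2'; simp at hv2'; omega
            have hvml : vN ≤ mlN := by
              have : max mlN 1 = mlN := by omega
              omega
            have hsml : s < mlN := by omega
            apply hvmin s hs1 hsv
            refine ⟨by omega, fun i hi => ?_⟩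
            have idx : mlN - (mlN - s) + i = s + i := by omega
            rw [idx]
            have e1 := hocc i (by omega)
            have e2 := hseg (s + i) (by omega)
            rw [hkm] at e2
            rw [hjeq] at e1
            rw [← e1, ← e2]
            congr 1
            omega
    · rw [if_neg hcond]
      push Not at hcond
      obtain ⟨hne, himp⟩ := hcond
      refine ⟨le_rfl, h3, h1, by omega, hseg, ?_, hnocc⟩
      intro hml0
      have := himp hml0
      rwa [PySem.List.pyGet?_of_nonneg p hml0] at this

lemma foldAbsorb (p : List (List Char)) (S : List Int) :
    ∀ (rest : List (List Char)) (st : Int × Int × Bool), st.2.2 = true →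
      (rest.foldl (fun (st : Int × Int × Bool) c =>
        if st.2.2 then st else
          let r := kmpSearchLoop p S c st.1 st.2.1 (st.2.1.toNat + 2)
          (r.1, r.2 + 1, decide (r.2 + 1 = (p.length : Int)))) st).2.2 = true := by
  intro rest
  induction rest with
  | nil => intro st h; simpa using h
  | cons c rest ih =>
    intro st h
    simp only [List.foldl_cons, h, if_pos]
    exact ih st h

lemma kmpFold (p : List (List Char)) (t : List (List Char))
    (hp : 1 ≤ p.length) (hS : (kmpTable p).length = p.length + 1)
    (hG : ∀ m : Nat, m ≤ p.length → GoodVal p m ((kmpTable p).getD m 1)) :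
    ∀ (rest pre : List (List Char)) (sp ml : Int),
      t = pre ++ rest → 0 ≤ sp → 0 ≤ ml → ml < (p.length : Int) → sp + ml = (pre.length : Int) →
      (∀ j : Nat, (j : Int) < ml → t[pre.length - ml.toNat + j]? = p[j]?) →
      (∀ j : Nat, (j : Int) < sp → ¬ OccAt t p j) →
      (((rest.foldl (fun (st : Int × Int × Bool) c =>
          if st.2.2 then st else
            let r := kmpSearchLoop p (kmpTable p) c st.1 st.2.1 (st.2.1.toNat + 2)
            (r.1, r.2 + 1, decide (r.2 + 1 = (p.length : Int)))) (sp, ml, false)).2.2 = true)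
        ↔ ∃ j : Nat, OccAt t p j) := by
  intro rest
  induction rest with
  | nil =>
    intro pre sp ml ht h0 h1 h2 h3 hseg hnocc
    simp only [List.foldl_nil]
    constructor
    · intro h; exact absurd h (by simp)
    · rintro ⟨j, hocc⟩
      exfalso
      have htl : t.length = pre.length := by rw [ht]; simp
      rcases Int.lt_or_le (j : Int) sp with hjs | hjs
      · exact hnocc j hjs hocc
      · have e := hocc (p.length - 1) (by omega)
        have h4 : p[p.length - 1]?.isSome := by simp only [isSome_getElem?]; omega
        rw [← e] at h4
        simp only [isSome_getElem?] at h4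
        omega
  | cons c rest' ih =>
    intro pre sp ml ht h0 h1 h2 h3 hseg hnocc
    have hc : t[pre.length]? = some c := by
      rw [ht, List.getElem?_append_right le_rfl]
      simp
    have HS := searchLoop_spec p (kmpTable p) t c hp hS hG pre.length hc
      (ml.toNat + 2) sp ml h0 (by omega) h2 h3 hseg hnocc (by push_cast; omega)
    obtain ⟨c1, c2, c3, c4, c5, c6, c7⟩ := HS
    simp only [List.foldl_cons]
    have hstep : ∀ b : Bool,
        ((if (sp, ml, false).2.2 then (sp, ml, false) else
          let r := kmpSearchLoop p (kmpTable p) c (sp, ml, false).1 (sp, ml, false).2.1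
            ((sp, ml, false).2.1.toNat + 2)
          (r.1, r.2 + 1, decide (r.2 + 1 = (p.length : Int)))) : Int × Int × Bool)
        = ((kmpSearchLoop p (kmpTable p) c sp ml (ml.toNat + 2)).1,
           (kmpSearchLoop p (kmpTable p) c sp ml (ml.toNat + 2)).2 + 1,
           decide ((kmpSearchLoop p (kmpTable p) c sp ml (ml.toNat + 2)).2 + 1 = (p.length : Int))) := by
      intro _; rfl
    rw [hstep true]
    set r := kmpSearchLoop p (kmpTable p) c sp ml (ml.toNat + 2) with hr
    by_cases hfound : r.2 + 1 = (p.length : Int)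
    · rw [decide_eq_true hfound]
      rw [foldAbsorb p (kmpTable p) rest' _ rfl]
      have hr20 : 0 ≤ r.2 := by omega
      have hocc : OccAt t p r.1.toNat := by
        intro i hi
        have hr1 : r.1.toNat = pre.length - r.2.toNat := by omega
        rcases Nat.lt_or_ge i (p.length - 1) with hil | hil
        · have := c5 i (by omega)
          rw [hr1]; rw [← this]
        · have hieq : i = p.length - 1 := by omega
          have hidx : r.1.toNat + i = pre.length := by omega
          rw [hidx, hc]
          have := c6 hr20
          have hr2v : r.2.toNat = p.length - 1 := by omega
          rw [hr2v] at this
          rw [hieq, this]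
      simp only [true_iff]
      exact ⟨r.1.toNat, hocc⟩
    · rw [decide_eq_false hfound]
      have hlt : r.2 + 1 < (p.length : Int) + 1 := by omega
      apply ih (pre ++ [c]) r.1 (r.2 + 1) (by rw [ht]; simp) (by omega) (by omega)
        (by omega) (by simp; omega)
      · intro j hj
        have hlen1 : (pre ++ [c]).length = pre.length + 1 := by simp
        rw [hlen1]
        have hidx : pre.length + 1 - (r.2 + 1).toNat + j = pre.length - r.2.toNat + j := by omega
        rw [hidx]
        rcases Nat.lt_or_ge j r.2.toNat with hjl | hjl
        · exact c5 j (by omega)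
        · have hjeq : (j : Int) = r.2 := by omega
          have hj2 : j = r.2.toNat := by omega
          have hidx2 : pre.length - r.2.toNat + j = pre.length := by omega
          rw [hidx2, hc, hj2, c6 (by omega)]
      · exact c7

lemma kmpFirstYield_iff (t p : List (List Char)) (hp : 1 ≤ p.length) :
    kmpFirstYield t p = true ↔ ∃ j : Nat, OccAt t p j := by
  unfold kmpFirstYield
  obtain ⟨hS, hG⟩ := kmpTable_spec p
  exact kmpFold p t hp hS hG t [] 0 0 rfl le_rfl le_rfl (by exact_mod_cast hp) (by simp)
    (by intro j hj; omega) (by intro j hj; omega)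

lemma any_congr_mem {a : Type} (l : List a) (f g : a → Bool)
    (h : ∀ x ∈ l, f x = g x) : l.any f = l.any g := by
  induction l with
  | nil => rfl
  | cons x xs ih =>
    simp only [List.any_cons, h x (by simp)]
    rw [ih (fun y hy => h y (by simp [hy]))]

lemma occAt_iff (t p : List (List Char)) (j : Nat) :
    OccAt t p j ↔ (t.drop j).take p.length = p := by
  constructor
  · intro h
    apply List.ext_getElem?
    intro i
    rcases Nat.lt_or_ge i p.length with hi | hi
    · rw [List.getElem?_take_of_lt hi, List.getElem?_drop, h i hi]
    · rw [List.getElem?_eq_none (le_trans (by simp) hi), (List.getElem?_eq_none hi).symm]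
  · intro h i hi
    have : ((t.drop j).take p.length)[i]? = p[i]? := by rw [h]
    rwa [List.getElem?_take_of_lt hi, List.getElem?_drop] at this


lemma naive_any_iff (tokens p : List (List Char)) (hp : 1 ≤ p.length) :
    ((PySem.List.pyRange 0 ((tokens.length : Int) - (p.length : Int) + 1) 1).any (fun i =>
        PySem.List.slice tokens (some i) (some (i + (p.length : Int))) == p)) = true
      ↔ ∃ j : Nat, OccAt tokens p j := by
  rw [List.any_eq_true]
  constructor
  · rintro ⟨i, hmem, hslice⟩
    rw [PySem.List.mem_pyRange_one] at hmem
    obtain ⟨h0, hlt⟩ := hmem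
    rw [beq_iff_eq, PySem.List.slice_toNat _ h0 (by omega)] at hslice
    refine ⟨i.toNat, ?_⟩
    rw [occAt_iff]
    have : (i + (p.length : Int)).toNat - i.toNat = p.length := by omega
    rwa [this] at hslice
  · rintro ⟨j, hocc⟩
    have hlen : j + p.length ≤ tokens.length := by
      have h1 := hocc (p.length - 1) (by omega)
      have h2 : p[p.length - 1]?.isSome := by
        simp only [isSome_getElem?]; omega
      rw [← h1] at h2; simp only [isSome_getElem?] at h2; omega
    refine ⟨(j : Int), ?_, ?_⟩
    · rw [PySem.List.mem_pyRange_one]; constructor <;> [positivity; omega]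
    · rw [beq_iff_eq, PySem.List.slice_toNat _ (by positivity) (by positivity)]
      have h1 : ((j : Int) + (p.length : Int)).toNat - (j:Int).toNat = p.length := by omega
      have h2 : ((j:Int)).toNat = j := by omega
      rw [h1, h2, ← occAt_iff]
      exact hocc


-- ===== VERDICT (by name: the statement is the Claim_ definition above) =====
theorem isInChunk_spec : Claim_equal_isInChunk := by
  intro word chunklist _
  unfold Spec_isInChunk isInChunk isInChunk_alt
  dsimp only
  by_cases hmem : chunklist.contains word = true
  · rw [if_pos hmem, if_pos hmem]
  · rw [if_neg hmem, if_neg hmem]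
    by_cases hlen : (PySem.Chars.splitOn word.toList " ".toList).length > 1
    · rw [if_pos hlen, if_pos hlen]
      apply any_congr_mem
      intro chunk _
      have h1 : 1 ≤ (PySem.Chars.splitOn word.toList " ".toList).length := by omega
      rw [Bool.eq_iff_iff, kmpFirstYield_iff _ _ h1,
        naive_any_iff (PySem.Chars.splitOn chunk.toList " ".toList) _ h1]
    · rw [if_neg hlen, if_neg hlen]
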